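-- pv_equiv track=rewrite | github.com/yrod15x/Python | De Otros Py/sum_game.py | comparar_listas
-- ===== SOURCE A (Python) =====
-- def comparar_listas(lista1, lista2)->list:
--     dias = []
--     suma_lista1, suma_lista2 = 0, 0
--     for i in range(len(lista1)):
--         suma_lista1 += lista1[i]
--         suma_lista2 += lista2[i]
--         if suma_lista1 == suma_lista2:
--             dias.append(i+1)
--     return dias
-- ===== SOURCE B (Python) =====
-- def comparar_listas(lista1, lista2) -> list:
--     # Brute force: recompute each prefix sum from scratch via slicing.
--     return [i + 1 for i in range(len(lista1))
--             if sum(lista1[:i + 1]) == sum(lista2[:i + 1])]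
-- ===== Notes on version B (the rewrite author's own statement) =====
-- stated objective: alternative
-- what changed: B abandons A's single loop with two incrementally maintained running sums: it recomputes each prefix sum from scratch with slicing (sum(lista[:i+1])) inside a comprehension, a quadratic brute-force strategy that maintains no state across iterations.
import Mathlib
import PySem

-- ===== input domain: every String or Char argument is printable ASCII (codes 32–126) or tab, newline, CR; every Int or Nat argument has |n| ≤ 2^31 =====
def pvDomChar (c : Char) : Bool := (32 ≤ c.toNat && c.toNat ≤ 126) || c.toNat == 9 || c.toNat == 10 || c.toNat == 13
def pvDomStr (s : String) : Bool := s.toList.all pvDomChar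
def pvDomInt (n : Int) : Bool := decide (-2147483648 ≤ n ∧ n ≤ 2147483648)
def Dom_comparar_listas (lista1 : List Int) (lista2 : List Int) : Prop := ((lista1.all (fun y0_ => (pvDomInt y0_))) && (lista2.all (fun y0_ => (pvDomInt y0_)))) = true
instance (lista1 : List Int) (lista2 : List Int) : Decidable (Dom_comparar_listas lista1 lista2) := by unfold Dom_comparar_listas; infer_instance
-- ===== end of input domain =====

-- B replaces A's incremental two-running-sums loop by a stateless brute-force comprehension that recomputes each prefix sum from a slice; return value only.

-- ===== PORT A =====
def comparar_listas (lista1 : List Int) (lista2 : List Int) : List Int :=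
  let st := (PySem.List.pyRange 0 (lista1.length : Int) 1).foldl
    (fun (st : List Int × Int × Int) i =>
      let s1 := st.2.1 + PySem.List.pyGetD lista1 i 0
      let s2 := st.2.2 + PySem.List.pyGetD lista2 i 0
      if s1 == s2 then (st.1 ++ [i + 1], s1, s2) else (st.1, s1, s2))
    ([], 0, 0)
  st.1

-- ===== PORT B =====
def comparar_listas_alt (lista1 : List Int) (lista2 : List Int) : List Int :=
  (PySem.List.pyRange 0 (lista1.length : Int) 1).filterMap
    (fun i =>
      if (PySem.List.slice lista1 none (some (i + 1))).sum
           == (PySem.List.slice lista2 none (some (i + 1))).sum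
      then some (i + 1) else none)

-- ===== PRECONDITION & SPEC =====
-- Pre_ excludes exactly the inputs where Python A raises IndexError (lista2 shorter than lista1).
def Pre_comparar_listas (lista1 : List Int) (lista2 : List Int) : Prop := lista1.length ≤ lista2.length
instance (lista1 : List Int) (lista2 : List Int) : Decidable (Pre_comparar_listas lista1 lista2) := by unfold Pre_comparar_listas; infer_instance
def pvWitness_comparar_listas : List Int × List Int := ([1, 2], [2, 1])

def Spec_comparar_listas (lista1 : List Int) (lista2 : List Int) (out : List Int) : Prop := out = comparar_listas_alt lista1 lista2
instance (lista1 : List Int) (lista2 : List Int) (out : List Int) : Decidable (Spec_comparar_listas lista1 lista2 out) := by unfold Spec_comparar_listas; infer_instance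

-- ===== CLAIM (what is proved, stated in full; the proofs are below) =====
def Claim_equal_comparar_listas : Prop := ∀ (lista1 : List Int) (lista2 : List Int), Dom_comparar_listas lista1 lista2 → Pre_comparar_listas lista1 lista2 → Spec_comparar_listas lista1 lista2 (comparar_listas lista1 lista2)

-- ===== LEMMAS AND PROOFS =====

-- prefix-sum helper used only by the proofs
def pvP (f : Int → Int) (m : Int) : Int := ((PySem.List.pyRange 0 m 1).map f).sum

lemma pvP_succ (f : Int → Int) (n : Nat) : pvP f ((n : Int) + 1) = pvP f n + f n := by
  unfold pvP
  rw [PySem.List.pyRange_one_succ_right (by positivity)]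
  simp

-- A's fold characterized
lemma foldA_char (f1 f2 : Int → Int) (n : Nat) :
    (PySem.List.pyRange 0 (n : Int) 1).foldl
      (fun (st : List Int × Int × Int) i =>
        let s1 := st.2.1 + f1 i
        let s2 := st.2.2 + f2 i
        if s1 == s2 then (st.1 ++ [i + 1], s1, s2) else (st.1, s1, s2))
      ([], 0, 0)
    = ((PySem.List.pyRange 0 (n : Int) 1).filterMap
        (fun i => if pvP f1 (i + 1) == pvP f2 (i + 1) then some (i + 1) else none),
       pvP f1 n, pvP f2 n) := by
  induction n with
  | zero => simp [pvP]
  | succ n ih =>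
    have hcast : ((n + 1 : Nat) : Int) = (n : Int) + 1 := by push_cast; ring
    rw [hcast, PySem.List.pyRange_one_succ_right (by positivity)]
    rw [List.foldl_append, List.filterMap_append, ih]
    simp only [List.foldl_cons, List.foldl_nil, List.filterMap_cons, List.filterMap_nil]
    rw [pvP_succ, pvP_succ]
    by_cases h : pvP f1 n + f1 n = pvP f2 n + f2 n <;> simp [h]

-- sum of a take-prefix equals the pvP prefix sum of the pyGetD accessor (pyGetD defaults to 0 past the end, take clamps)
lemma sum_take_eq_pvP (xs : List Int) (k : Nat) :
    (xs.take k).sum = pvP (fun i => PySem.List.pyGetD xs i 0) k := by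
  induction k with
  | zero => simp [pvP]
  | succ k ih =>
    have hcast : ((k + 1 : Nat) : Int) = (k : Int) + 1 := by push_cast; ring
    rw [hcast, pvP_succ, ← ih, List.take_add_one]
    simp only [List.sum_append, PySem.List.pyGetD_natCast, List.getD]
    cases xs[k]? <;> simp

-- B's slice-sum equals the pvP prefix sum, for 0 ≤ i
lemma slice_sum_eq_pvP (xs : List Int) (i : Int) (hi : 0 ≤ i) :
    (PySem.List.slice xs none (some (i + 1))).sum
      = pvP (fun j => PySem.List.pyGetD xs j 0) (i + 1) := by
  rw [PySem.List.slice_to xs (by omega)]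
  rw [sum_take_eq_pvP]
  congr 1
  omega

-- ===== VERDICT (by name: the statement is the Claim_ definition above) =====
theorem comparar_listas_spec : Claim_equal_comparar_listas := by
  intro lista1 lista2 _ _
  unfold Spec_comparar_listas comparar_listas comparar_listas_alt
  set f1 : Int → Int := fun i => PySem.List.pyGetD lista1 i 0 with hf1
  set f2 : Int → Int := fun i => PySem.List.pyGetD lista2 i 0 with hf2
  set n := lista1.length with hn
  simp only []
  rw [foldA_char f1 f2 n]
  apply List.filterMap_congr
  intro i hi
  have h0 : 0 ≤ i := ((PySem.List.mem_pyRange_one).1 hi).1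
  rw [slice_sum_eq_pvP lista1 i h0, slice_sum_eq_pvP lista2 i h0]
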